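-- pv_equiv track=rewrite | github.com/Mansi-unge/python-playground | Udemy_excercise/problem_17.py | scan_parcels
-- ===== SOURCE A (Python) =====
-- def scan_parcels(parcel_codes: list[str]) -> list[str]:
--     messages = []
--     for bar_code in parcel_codes:
--         if bar_code == "DAMAGED":
--             continue
--             messages.append("skipped damaged parcel")
--         if bar_code == "STOP":
--             break
--             messages.append("Critical error: Stopping scan")
--         else:
--             messages.append(f"Scanned parcel: {bar_code}")
--     else:
--         messages.append("All parcels scanned successfully")
--     return messages
-- ===== SOURCE B (Python) =====
-- def scan_parcels(parcel_codes: list[str]) -> list[str]: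
--     stopped = "STOP" in parcel_codes
--     prefix = parcel_codes[:parcel_codes.index("STOP")] if stopped else parcel_codes
--     messages = [f"Scanned parcel: {c}" for c in prefix if c != "DAMAGED"]
--     return messages if stopped else messages + ["All parcels scanned successfully"]
-- ===== Notes on version B (the rewrite author's own statement) =====
-- stated objective: simpler
-- what changed: Replaces the single break/continue loop with for-else by a locate-the-cut decomposition: find the first 'STOP' index, slice the prefix, build all messages with one comprehension, and append the success message only when no 'STOP' occurs.
import Mathlib
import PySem

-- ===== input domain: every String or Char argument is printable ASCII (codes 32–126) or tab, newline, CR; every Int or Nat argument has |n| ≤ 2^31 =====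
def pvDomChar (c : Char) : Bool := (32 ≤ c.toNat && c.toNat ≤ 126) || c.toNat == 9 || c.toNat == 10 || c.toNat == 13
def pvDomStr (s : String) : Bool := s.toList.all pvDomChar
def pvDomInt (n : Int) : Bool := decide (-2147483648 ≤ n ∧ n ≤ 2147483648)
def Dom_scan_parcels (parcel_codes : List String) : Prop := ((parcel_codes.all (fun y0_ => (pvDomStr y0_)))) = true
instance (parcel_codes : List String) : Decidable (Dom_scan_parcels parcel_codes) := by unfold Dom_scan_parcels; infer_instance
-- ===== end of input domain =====

-- B replaces A's break/continue loop with for-else by a STOP-index cut: slice the prefix before the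
-- first "STOP", one comprehension over it, and append the success message only when "STOP" is absent (simpler).


-- ===== PORT A =====
-- the loop: 'continue' on DAMAGED skips both checks, 'break' on STOP skips the for-else suffix
def scan_parcels_loop (acc : List String) : List String → List String
  | [] => acc ++ ["All parcels scanned successfully"]
  | bar_code :: rest =>
    if bar_code = "DAMAGED" then scan_parcels_loop acc rest
    else if bar_code = "STOP" then acc
    else scan_parcels_loop (acc ++ ["Scanned parcel: " ++ bar_code]) rest

def scan_parcels (parcel_codes : List String) : List String :=
  scan_parcels_loop [] parcel_codes

-- ===== PORT B =====
def scan_parcels_alt (parcel_codes : List String) : List String :=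
  match PySem.List.index? parcel_codes "STOP" with
  | some i =>
    ((PySem.List.slice parcel_codes none (some (i : Int))).filter
      (fun c => c ≠ "DAMAGED")).map (fun c => "Scanned parcel: " ++ c)
  | none =>
    ((parcel_codes.filter (fun c => c ≠ "DAMAGED")).map (fun c => "Scanned parcel: " ++ c))
      ++ ["All parcels scanned successfully"]

-- ===== PRECONDITION & SPEC =====
def Spec_scan_parcels (parcel_codes : List String) (out : List String) : Prop := out = scan_parcels_alt parcel_codes
instance (parcel_codes : List String) (out : List String) : Decidable (Spec_scan_parcels parcel_codes out) := by unfold Spec_scan_parcels; infer_instance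

-- ===== CLAIM (what is proved, stated in full; the proofs are below) =====
def Claim_equal_scan_parcels : Prop := ∀ (parcel_codes : List String), Dom_scan_parcels parcel_codes → Spec_scan_parcels parcel_codes (scan_parcels parcel_codes)

-- ===== LEMMAS AND PROOFS =====
lemma scan_parcels_loop_eq_alt (parcel_codes : List String) :
    ∀ acc, scan_parcels_loop acc parcel_codes = acc ++ scan_parcels_alt parcel_codes := by
  induction parcel_codes with
  | nil => intro acc; simp [scan_parcels_loop, scan_parcels_alt, PySem.List.index?]
  | cons c rest ih =>
    intro acc
    by_cases hd : c = "DAMAGED"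
    · subst hd
      rw [scan_parcels_loop, if_pos rfl, ih]
      have hne : "DAMAGED" ≠ "STOP" := by decide
      rw [scan_parcels_alt, scan_parcels_alt, PySem.List.index?_cons_of_ne rest hne]
      cases h : PySem.List.index? rest "STOP" with
      | none => simp
      | some i =>
        simp only [Option.map_some]
        rw [PySem.List.slice_to _ (Int.natCast_nonneg i),
          PySem.List.slice_to _ (Int.natCast_nonneg (i + 1))]
        simp [List.take_succ_cons]
    · by_cases hs : c = "STOP"
      · subst hs
        rw [scan_parcels_loop, if_neg hd, if_pos rfl]
        rw [scan_parcels_alt, PySem.List.index?_cons_self]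
        simp [PySem.List.slice_to]
      · rw [scan_parcels_loop, if_neg hd, if_neg hs, ih]
        have hne : c ≠ "STOP" := hs
        rw [scan_parcels_alt, scan_parcels_alt, PySem.List.index?_cons_of_ne rest hne]
        cases h : PySem.List.index? rest "STOP" with
        | none => simp [hd]
        | some i =>
          simp only [Option.map_some]
          rw [PySem.List.slice_to _ (Int.natCast_nonneg i),
            PySem.List.slice_to _ (Int.natCast_nonneg (i + 1))]
          simp [List.take_succ_cons, hd]

-- ===== VERDICT (by name: the statement is the Claim_ definition above) =====
theorem scan_parcels_spec : Claim_equal_scan_parcels := by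
  intro parcel_codes _
  show scan_parcels parcel_codes = scan_parcels_alt parcel_codes
  rw [scan_parcels, scan_parcels_loop_eq_alt, List.nil_append]
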